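-- pv_equiv track=rewrite | github.com/bambooforest/acqdiv | acqdiv/parsers/xml/CHATCleaner.py | single_morph_word
-- ===== SOURCE A (Python) =====
-- def single_morph_word(utterance, morph_tier):
--     """Handle complexes consisting of a single morphological word.
--
--     A complex consists of several stems that are either joined by + or _.
--
--     A complex is a single morphological word, if it has a single POS tag.
--     The orthographic word will be joined by an underscore. Example:
--     POS|stem1_stem2-SFX
--     word:
--         seg = stem1_stem2   gloss = ??? pos = POS
--         seg = ???           gloss = SFX pos = ???
--     """
--     wwords = utterance.split(' ')
--     mwords = morph_tier.split(' ')
--     wwords_count = len(wwords)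
--     mwords_count = len(mwords)
--
--     i = 0
--     while i < wwords_count and i < mwords_count:
--         mword = mwords[i]
--         wword = wwords[i]
--         if '_' in mword or '+' in mword:
--             if '_' not in wword and '+' not in wword:
--                 # check if wword and mword are similar (-> misalignment)
--                 if wword[:2] in mword:
--                     # check if there is a next word (-> missing join sep)
--                     if i + 1 < wwords_count:
--                         next_word = wwords[i+1]
--                         # check if wword and mword are similar
--                         if next_word[:2] in mword:
--                             del wwords[i+1]
--                             wwords[i] += '_' + next_word
--                             wwords_count -= 1
--         i += 1
--
--     return ' '.join(wwords), morph_tier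
-- ===== SOURCE B (Python) =====
-- def single_morph_word(utterance, morph_tier):
--     """Handle complexes consisting of a single morphological word."""
--     wwords = utterance.split(' ')
--     mwords = morph_tier.split(' ')
--     n = len(wwords)
--     mc = len(mwords)
--     out = []
--     p = 0
--     while len(out) < mc and p < n:
--         mword = mwords[len(out)]
--         w = wwords[p]
--         if (('_' in mword or '+' in mword)
--                 and '_' not in w and '+' not in w
--                 and w[:2] in mword
--                 and p + 1 < n
--                 and wwords[p + 1][:2] in mword):
--             out.append(w + '_' + wwords[p + 1])
--             p += 2
--         else:
--             out.append(w)
--             p += 1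
--     out.extend(wwords[p:])
--     return ' '.join(out), morph_tier
-- ===== Notes on version B (the rewrite author's own statement) =====
-- stated objective: simpler
-- what changed: B builds a fresh output list with a read pointer into the original word list (merging consumes two input words at once and the unprocessed tail is appended at the end), instead of A's in-place deletion from the list being iterated with a shrinking length counter.
import Mathlib
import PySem

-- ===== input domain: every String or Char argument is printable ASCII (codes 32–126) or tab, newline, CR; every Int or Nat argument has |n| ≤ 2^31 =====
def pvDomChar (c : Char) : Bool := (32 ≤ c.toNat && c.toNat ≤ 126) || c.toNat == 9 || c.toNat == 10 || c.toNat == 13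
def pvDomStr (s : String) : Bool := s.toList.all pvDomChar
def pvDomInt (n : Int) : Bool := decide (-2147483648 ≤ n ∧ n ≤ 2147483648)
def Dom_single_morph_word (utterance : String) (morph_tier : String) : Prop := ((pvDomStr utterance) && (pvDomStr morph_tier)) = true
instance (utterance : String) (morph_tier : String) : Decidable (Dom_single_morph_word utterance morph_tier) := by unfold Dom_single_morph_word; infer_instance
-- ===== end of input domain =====

-- B builds a fresh output list with a read pointer instead of A's in-place deletion; objective: simpler (return value only; A mutates only its own local list).
-- Python's 's + "_" + t' is ported exactly as PySem.Str.join "_" [s, t].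

-- ===== PORT A =====
-- A's while loop: state = (current wwords list, index i); mwords never changes.
-- mword = mwords[i], wword = wwords[i], next_word = wwords[i+1] appear inline as getD (indices are guarded in range).
def smwLoopA (mwords : List String) (ws : List String) (i : Nat) : List String :=
  if h0 : i < ws.length ∧ i < mwords.length then
    if PySem.Str.isIn "_" (mwords.getD i "") || PySem.Str.isIn "+" (mwords.getD i "") then
      if !PySem.Str.isIn "_" (ws.getD i "") && !PySem.Str.isIn "+" (ws.getD i "") then
        if PySem.Str.isIn (PySem.Str.slice (ws.getD i "") none (some 2)) (mwords.getD i "") then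
          if h1 : i + 1 < ws.length then
            if PySem.Str.isIn (PySem.Str.slice (ws.getD (i+1) "") none (some 2)) (mwords.getD i "") then
              -- del wwords[i+1]; wwords[i] += '_' + next_word
              smwLoopA mwords (((ws.eraseIdx (i+1)).set i (PySem.Str.join "_" [ws.getD i "", ws.getD (i+1) ""]))) (i+1)
            else smwLoopA mwords ws (i+1)
          else smwLoopA mwords ws (i+1)
        else smwLoopA mwords ws (i+1)
      else smwLoopA mwords ws (i+1)
    else smwLoopA mwords ws (i+1)
  else ws
termination_by ws.length - i
decreasing_by all_goals simp_all [List.length_eraseIdx, List.length_set] <;> omega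

def single_morph_word (utterance : String) (morph_tier : String) : String × String :=
  (PySem.Str.join " " (smwLoopA ((PySem.Str.split? morph_tier " ").getD []) ((PySem.Str.split? utterance " ").getD []) 0), morph_tier)

-- ===== PORT B =====
-- B's loop: consumes the remaining input words (the read pointer p is the amount consumed),
-- i = number of output words already produced; once i ≥ len(mwords) the rest is appended unchanged.
def smwLoopB (mwords : List String) (i : Nat) : List String → List String
  | [] => []
  | w :: rest =>
    if i < mwords.length then
      if ((PySem.Str.isIn "_" (mwords.getD i "") || PySem.Str.isIn "+" (mwords.getD i ""))
            && !PySem.Str.isIn "_" w && !PySem.Str.isIn "+" w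
            && PySem.Str.isIn (PySem.Str.slice w none (some 2)) (mwords.getD i "")) then
        match rest with
        | nw :: rest2 =>
          if PySem.Str.isIn (PySem.Str.slice nw none (some 2)) (mwords.getD i "") then
            PySem.Str.join "_" [w, nw] :: smwLoopB mwords (i+1) rest2
          else w :: smwLoopB mwords (i+1) (nw :: rest2)
        | [] => w :: smwLoopB mwords (i+1) []
      else w :: smwLoopB mwords (i+1) rest
    else w :: rest
termination_by ws => ws.length
decreasing_by all_goals simp_all

def single_morph_word_alt (utterance : String) (morph_tier : String) : String × String :=
  (PySem.Str.join " " (smwLoopB ((PySem.Str.split? morph_tier " ").getD []) 0 ((PySem.Str.split? utterance " ").getD [])), morph_tier)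

-- ===== PRECONDITION & SPEC =====
def Spec_single_morph_word (utterance : String) (morph_tier : String) (out : String × String) : Prop := out = single_morph_word_alt utterance morph_tier
instance (utterance : String) (morph_tier : String) (out : String × String) : Decidable (Spec_single_morph_word utterance morph_tier out) := by unfold Spec_single_morph_word; infer_instance

-- ===== CLAIM (what is proved, stated in full; the proofs are below) =====
def Claim_equal_single_morph_word : Prop := ∀ (utterance : String) (morph_tier : String), Dom_single_morph_word utterance morph_tier → Spec_single_morph_word utterance morph_tier (single_morph_word utterance morph_tier)

-- ===== LEMMAS AND PROOFS =====

lemma smw_getD_append (pre : List String) (w : String) (rest : List String) (d : String) :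
    (pre ++ w :: rest).getD pre.length d = w := by
  simp [List.getD]

lemma smw_eraseIdx_append (pre : List String) (x : String) (l : List String) :
    (pre ++ x :: l).eraseIdx pre.length = pre ++ l := by
  induction pre with
  | nil => simp
  | cons a t ihh => simp [ihh]

lemma smw_set_append (pre : List String) (x : String) (l : List String) (y : String) :
    (pre ++ x :: l).set pre.length y = pre ++ y :: l := by
  induction pre with
  | nil => simp
  | cons a t ihh => simp [ihh]

-- A's state is always (already-processed prefix) ++ (unconsumed suffix) with i = length of the prefix;
-- the prefix is never touched again, and B produces exactly that prefix.
lemma smw_main (mwords : List String) :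
    ∀ n ws pre, ws.length = n →
      smwLoopA mwords (pre ++ ws) pre.length = pre ++ smwLoopB mwords pre.length ws := by
  intro n
  induction n using Nat.strong_induction_on with
  | _ n ih =>
    intro ws pre hlen
    match ws with
    | [] => rw [smwLoopA]; simp [smwLoopB]
    | w :: rest =>
      by_cases hm : pre.length < mwords.length
      · have hwl : pre.length < (pre ++ w :: rest).length := by simp
        have hrn : rest.length < n := by simp at hlen; omega
        have hstep : smwLoopA mwords (pre ++ w :: rest) (pre.length + 1)
            = pre ++ w :: smwLoopB mwords (pre.length + 1) rest := by
          have h := ih rest.length hrn rest (pre ++ [w]) rfl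
          simp at h
          exact h
        rw [smwLoopA, dif_pos ⟨hwl, hm⟩]
        rcases rest with _ | ⟨nw, rest2⟩
        · have h1 : ¬ (pre.length + 1 < (pre ++ [w]).length) := by simp
          simp only [smw_getD_append, h1, dite_false, hstep]
          split_ifs <;> simp_all [smwLoopB]
        · have hnext : (pre ++ w :: nw :: rest2).getD (pre.length + 1) "" = nw := by
            have h := smw_getD_append (pre ++ [w]) nw rest2 ""
            simpa using h
          have h1 : pre.length + 1 < (pre ++ w :: nw :: rest2).length := by simp
          have hr2 : rest2.length < n := by simp at hlen; omega
          have hmerge : ∀ s : String, ((pre ++ w :: nw :: rest2).eraseIdx (pre.length+1)).set pre.length s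
              = pre ++ s :: rest2 := by
            intro s
            have he : (pre ++ w :: nw :: rest2).eraseIdx (pre.length+1) = pre ++ w :: rest2 := by
              have h := smw_eraseIdx_append (pre ++ [w]) nw rest2
              simpa using h
            rw [he]; exact smw_set_append pre w rest2 s
          have hstep2 : ∀ s : String, smwLoopA mwords (pre ++ s :: rest2) (pre.length + 1)
              = pre ++ s :: smwLoopB mwords (pre.length + 1) rest2 := by
            intro s
            have h := ih rest2.length hr2 rest2 (pre ++ [s]) rfl
            simpa using h
          simp only [smw_getD_append, hnext, h1, dite_true, hmerge, hstep2, hstep]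
          simp only [smwLoopB, if_pos hm]
          split_ifs <;> simp_all
      · rw [smwLoopA]
        have hng : ¬ (pre.length < (pre ++ w :: rest).length ∧ pre.length < mwords.length) := by
          simp [hm]
        rw [dif_neg hng, smwLoopB.eq_def]
        simp [hm]

-- ===== VERDICT (by name: the statement is the Claim_ definition above) =====
theorem single_morph_word_spec : Claim_equal_single_morph_word := by
  intro u m _
  unfold Spec_single_morph_word single_morph_word single_morph_word_alt
  have h := smw_main ((PySem.Str.split? m " ").getD []) ((PySem.Str.split? u " ").getD []).length ((PySem.Str.split? u " ").getD []) [] rfl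
  simp only [List.nil_append, List.length_nil] at h
  exact congrArg (fun l => (PySem.Str.join " " l, m)) h
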